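-- pv_equiv track=rewrite | github.com/hulseyvincentr/syntax_analysis | py_files/outlier_graphs.py | _infer_med_lat_hit_from_injections
-- ===== SOURCE A (Python) =====
-- from typing import Any, Dict, List, Optional, Tuple, Union
--
-- def _normalize_flag(val: Any) -> Optional[bool]:
--     """Return True/False for Y/N-like values; None if unknown/blank."""
--     if val is None:
--         return None
--     s = str(val).strip().upper()
--     if not s:
--         return None
--     if s in {"Y", "YES", "TRUE", "T", "1"}:
--         return True
--     if s in {"N", "NO", "FALSE", "F", "0"}:
--         return False
--     return None
--
-- def _infer_med_lat_hit_from_injections(entry: Dict[str, Any]) -> Tuple[Optional[bool], Optional[bool]]: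
--     """Fallback: infer Medial/Lateral hit by scanning entry["injections"] for Y/N flags."""
--     injections = entry.get("injections", []) or []
--     if not injections:
--         return None, None
--
--     med_any = False
--     lat_any = False
--     med_has_true = False
--     med_has_false = False
--     lat_has_true = False
--     lat_has_false = False
--
--     for inj in injections:
--         m = _normalize_flag(inj.get("Medial Area X hit?", None))
--         l = _normalize_flag(inj.get("Lateral Area X hit?", None))
--
--         if m is not None:
--             med_any = True
--             med_has_true = med_has_true or bool(m)
--             med_has_false = med_has_false or (not bool(m))
--
--         if l is not None:
--             lat_any = True
--             lat_has_true = lat_has_true or bool(l)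
--             lat_has_false = lat_has_false or (not bool(l))
--
--     def _collapse(any_flag: bool, has_true: bool, has_false: bool) -> Optional[bool]:
--         if not any_flag:
--             return None
--         if has_true:
--             return True
--         if has_false:
--             return False
--         return None
--
--     return _collapse(med_any, med_has_true, med_has_false), _collapse(lat_any, lat_has_true, lat_has_false)
-- ===== SOURCE B (Python) =====
-- from typing import Any, Dict, Optional, Tuple
--
-- def _normalize_flag(val: Any) -> Optional[bool]:
--     """Return True/False for Y/N-like values; None if unknown/blank."""
--     if val is None:
--         return None
--     s = str(val).strip().upper()
--     if not s:
--         return None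
--     if s in {"Y", "YES", "TRUE", "T", "1"}:
--         return True
--     if s in {"N", "NO", "FALSE", "F", "0"}:
--         return False
--     return None
--
-- # Tri-state encoded as a rank under the order None < False < True:
-- # the answer for a side is simply the maximum rank seen (0 on an empty scan).
-- _RANK = {None: 0, False: 1, True: 2}
-- _BACK = (None, False, True)
--
-- def _infer_med_lat_hit_from_injections(entry: Dict[str, Any]) -> Tuple[Optional[bool], Optional[bool]]:
--     injections = entry.get("injections", []) or []
--     med = max((_RANK[_normalize_flag(inj.get("Medial Area X hit?"))] for inj in injections), default=0)
--     lat = max((_RANK[_normalize_flag(inj.get("Lateral Area X hit?"))] for inj in injections), default=0)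
--     return _BACK[med], _BACK[lat]
-- ===== Notes on version B (the rewrite author's own statement) =====
-- stated objective: alternative
-- what changed: Replaces A's interleaved loop over six boolean accumulators plus the _collapse early-return chain by an arithmetical formulation: each normalized flag is encoded as a rank under the total order None < False < True, each side's answer is the max rank over the injections (0 for an empty scan, so the empty-injections early return disappears), decoded back through a lookup table.
import Mathlib
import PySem

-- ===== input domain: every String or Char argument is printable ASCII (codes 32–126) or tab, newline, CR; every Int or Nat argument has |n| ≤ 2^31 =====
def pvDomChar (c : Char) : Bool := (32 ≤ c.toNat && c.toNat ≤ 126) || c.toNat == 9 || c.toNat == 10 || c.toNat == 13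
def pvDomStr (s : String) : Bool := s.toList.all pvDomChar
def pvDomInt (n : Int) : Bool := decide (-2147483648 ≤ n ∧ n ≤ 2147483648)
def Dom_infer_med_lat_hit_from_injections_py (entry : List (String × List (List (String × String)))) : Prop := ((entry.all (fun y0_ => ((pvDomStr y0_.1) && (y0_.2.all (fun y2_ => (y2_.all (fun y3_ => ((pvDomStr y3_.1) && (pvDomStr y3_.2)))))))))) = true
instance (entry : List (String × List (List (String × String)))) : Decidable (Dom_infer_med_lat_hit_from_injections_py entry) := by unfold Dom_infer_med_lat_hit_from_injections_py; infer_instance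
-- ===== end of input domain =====

-- B replaces A's six-boolean accumulator loop and _collapse early-return chain by an arithmetical
-- formulation: flags ranked under None < False < True, max rank per side, decoded by table; objective: alternative.

-- ===== PORT A =====
-- shared helper: _normalize_flag (identical in Source A and Source B)
def pyNormalizeFlag (val : Option String) : Option Bool :=
  match val with
  | none => none
  | some v =>
    let s := PySem.Str.upper (PySem.Str.strip v)
    if s = "" then none
    else if ["Y", "YES", "TRUE", "T", "1"].contains s then some true
    else if ["N", "NO", "FALSE", "F", "0"].contains s then some false
    else none

-- _collapse helper of A
def pyCollapse (anyFlag hasTrue hasFalse : Bool) : Option Bool :=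
  if !anyFlag then none
  else if hasTrue then some true
  else if hasFalse then some false
  else none

def infer_med_lat_hit_from_injections_py (entry : List (String × List (List (String × String)))) : Option Bool × Option Bool :=
  let injections := ((PySem.Dict.mk entry).get? "injections").getD []
  if injections = [] then (none, none)
  else
    -- the six booleans med_any/…/lat_has_false, threaded through the loop as one tuple
    let st := injections.foldl
      (fun (st : (Bool × Bool × Bool) × (Bool × Bool × Bool)) inj =>
        let m := pyNormalizeFlag ((PySem.Dict.mk inj).get? "Medial Area X hit?")
        let l := pyNormalizeFlag ((PySem.Dict.mk inj).get? "Lateral Area X hit?")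
        let ms := match m with
          | some b => (true, st.1.2.1 || b, st.1.2.2 || !b)
          | none => st.1
        let ls := match l with
          | some b => (true, st.2.2.1 || b, st.2.2.2 || !b)
          | none => st.2
        (ms, ls))
      ((false, false, false), (false, false, false))
    (pyCollapse st.1.1 st.1.2.1 st.1.2.2, pyCollapse st.2.1 st.2.2.1 st.2.2.2)

-- ===== PORT B =====
-- B's _RANK table: tri-state encoded under the order None < False < True
def rankOf (m : Option Bool) : Nat :=
  match m with
  | none => 0
  | some false => 1
  | some true => 2

-- B's _BACK table: (None, False, True)[r]
def backOf (r : Nat) : Option Bool :=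
  match r with
  | 0 => none
  | 1 => some false
  | _ => some true

def infer_med_lat_hit_from_injections_py_alt (entry : List (String × List (List (String × String)))) : Option Bool × Option Bool :=
  let injections := ((PySem.Dict.mk entry).get? "injections").getD []
  -- max(generator, default=0) per side, as a fold of Nat.max over the mapped ranks
  let med := (injections.map (fun inj =>
      rankOf (pyNormalizeFlag ((PySem.Dict.mk inj).get? "Medial Area X hit?")))).foldl max 0
  let lat := (injections.map (fun inj =>
      rankOf (pyNormalizeFlag ((PySem.Dict.mk inj).get? "Lateral Area X hit?")))).foldl max 0
  (backOf med, backOf lat)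

-- ===== PRECONDITION & SPEC =====
def Spec_infer_med_lat_hit_from_injections_py (entry : List (String × List (List (String × String)))) (out : Option Bool × Option Bool) : Prop := out = infer_med_lat_hit_from_injections_py_alt entry
instance (entry : List (String × List (List (String × String)))) (out : Option Bool × Option Bool) : Decidable (Spec_infer_med_lat_hit_from_injections_py entry out) := by unfold Spec_infer_med_lat_hit_from_injections_py; infer_instance

-- ===== CLAIM (what is proved, stated in full; the proofs are below) =====
def Claim_equal_infer_med_lat_hit_from_injections_py : Prop := ∀ (entry : List (String × List (List (String × String)))), Dom_infer_med_lat_hit_from_injections_py entry → Spec_infer_med_lat_hit_from_injections_py entry (infer_med_lat_hit_from_injections_py entry)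

-- ===== LEMMAS AND PROOFS =====

-- one side of A's accumulator, as a step on (any, has_true, has_false)
def stepFlag (st : Bool × Bool × Bool) (m : Option Bool) : Bool × Bool × Bool :=
  match m with
  | some b => (true, st.2.1 || b, st.2.2 || !b)
  | none => st

-- the state A's side-accumulator reaches after seeing the non-None values `v`
def flagState (v : List Bool) : Bool × Bool × Bool :=
  (!v.isEmpty, v.any id, v.any (!·))

-- the rank B's max-fold reaches after seeing the non-None values `v`
def encodeRank (v : List Bool) : Nat :=
  if v.any id then 2 else if v.isEmpty then 0 else 1

theorem foldl_stepFlag_flagState (ms : List (Option Bool)) (va : List Bool) :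
    ms.foldl stepFlag (flagState va) = flagState (va ++ ms.filterMap id) := by
  induction ms generalizing va with
  | nil => simp
  | cons m ms ih =>
    cases m with
    | none => simpa using ih va
    | some b =>
      have h : stepFlag (flagState va) (some b) = flagState (va ++ [b]) := by
        simp [stepFlag, flagState, Bool.or_comm]
      simp only [List.foldl_cons, h, ih (va ++ [b]), List.filterMap_cons]
      simp

theorem foldl_max_encodeRank (ms : List (Option Bool)) (va : List Bool) :
    (ms.map rankOf).foldl max (encodeRank va) = encodeRank (va ++ ms.filterMap id) := by
  induction ms generalizing va with
  | nil => simp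
  | cons m ms ih =>
    cases m with
    | none =>
      have h : max (encodeRank va) (rankOf none) = encodeRank va := by
        simp [rankOf]
      simpa [h] using ih va
    | some b =>
      have h : max (encodeRank va) (rankOf (some b)) = encodeRank (va ++ [b]) := by
        cases b <;> simp [rankOf, encodeRank] <;> split_ifs <;> simp_all
      simp only [List.map_cons, List.foldl_cons, h, ih (va ++ [b]), List.filterMap_cons]
      simp

theorem collapse_flagState (v : List Bool) :
    pyCollapse (flagState v).1 (flagState v).2.1 (flagState v).2.2 = backOf (encodeRank v) := by
  cases v with
  | nil => simp [flagState, pyCollapse, encodeRank, backOf]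
  | cons b v =>
    cases b <;> simp [flagState, pyCollapse, encodeRank, backOf] <;>
      split_ifs with h <;> simp_all

-- A's interleaved loop splits into the two independent side-accumulators
theorem foldl_pair_split {α : Type} (f g : α → Option Bool)
    (xs : List α) (s₁ s₂ : Bool × Bool × Bool) :
    xs.foldl
      (fun (st : (Bool × Bool × Bool) × (Bool × Bool × Bool)) x =>
        (stepFlag st.1 (f x), stepFlag st.2 (g x))) (s₁, s₂)
      = (xs.foldl (fun st x => stepFlag st (f x)) s₁,
         xs.foldl (fun st x => stepFlag st (g x)) s₂) := by
  induction xs generalizing s₁ s₂ with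
  | nil => rfl
  | cons x xs ih => simp [List.foldl_cons, ih]

-- ===== VERDICT (by name: the statement is the Claim_ definition above) =====
theorem infer_med_lat_hit_from_injections_py_spec : Claim_equal_infer_med_lat_hit_from_injections_py := by
  intro entry _
  show infer_med_lat_hit_from_injections_py entry = infer_med_lat_hit_from_injections_py_alt entry
  unfold infer_med_lat_hit_from_injections_py infer_med_lat_hit_from_injections_py_alt
  set injections := ((PySem.Dict.mk entry).get? "injections").getD [] with hinj
  set f := fun inj => pyNormalizeFlag ((PySem.Dict.mk inj).get? "Medial Area X hit?") with hf
  set g := fun inj => pyNormalizeFlag ((PySem.Dict.mk inj).get? "Lateral Area X hit?") with hg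
  have hB : ∀ (h : List (String × String) → Option Bool),
      (injections.map (fun inj => rankOf (h inj))).foldl max 0
        = encodeRank (injections.filterMap h) := by
    intro h
    have := foldl_max_encodeRank (injections.map h) []
    simpa [List.map_map, List.filterMap_map, Function.comp, encodeRank] using this
  have hstep : (fun (st : (Bool × Bool × Bool) × (Bool × Bool × Bool))
      (inj : List (String × String)) =>
        let m := pyNormalizeFlag ((PySem.Dict.mk inj).get? "Medial Area X hit?")
        let l := pyNormalizeFlag ((PySem.Dict.mk inj).get? "Lateral Area X hit?")
        let ms := match m with
          | some b => (true, st.1.2.1 || b, st.1.2.2 || !b)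
          | none => st.1
        let ls := match l with
          | some b => (true, st.2.2.1 || b, st.2.2.2 || !b)
          | none => st.2
        (ms, ls))
      = (fun st inj => (stepFlag st.1 (f inj), stepFlag st.2 (g inj))) := by
    funext st inj
    simp only [hf, hg, stepFlag]
  rcases heq : injections with _ | ⟨i, is⟩
  · simp [backOf]
  · rw [← heq]
    have hne : injections ≠ [] := by simp [heq]
    simp only [if_neg hne, hstep, foldl_pair_split]
    have key : ∀ (h : List (String × String) → Option Bool),
        injections.foldl (fun st x => stepFlag st (h x)) (flagState [])
          = flagState (injections.filterMap h) := by
      intro h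
      have := foldl_stepFlag_flagState (injections.map h) []
      simpa [List.foldl_map, List.filterMap_map, Function.comp] using this
    have hBf : (injections.map (fun inj =>
        rankOf (pyNormalizeFlag ((PySem.Dict.mk inj).get? "Medial Area X hit?")))).foldl max 0
          = encodeRank (injections.filterMap f) := hB f
    have hBg : (injections.map (fun inj =>
        rankOf (pyNormalizeFlag ((PySem.Dict.mk inj).get? "Lateral Area X hit?")))).foldl max 0
          = encodeRank (injections.filterMap g) := hB g
    rw [show ((false, false, false) : Bool × Bool × Bool) = flagState [] from rfl,
        key f, key g, collapse_flagState, collapse_flagState, hBf, hBg]
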